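-- pv_equiv track=rewrite | github.com/Garmelon/advent-of-code | py/2015/03/solve.py | find_doubles
-- ===== SOURCE A (Python) =====
-- def find_doubles(steps):
-- 	x, y = 0, 0
-- 	houses = {(0, 0)}
-- 	for step in steps:
-- 		if   step == "^": y += 1
-- 		elif step == "v": y -= 1
-- 		elif step == "<": x -= 1
-- 		elif step == ">": x += 1
-- 		houses.add((x, y))
-- 	return houses
-- ===== SOURCE B (Python) =====
-- def find_doubles(steps):
-- 	def solve(s):
-- 		if len(s) == 0:
-- 			return (0, 0), []
-- 		if len(s) == 1:
-- 			d = ((s == ">") - (s == "<"), (s == "^") - (s == "v"))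
-- 			return d, [d]
-- 		mid = len(s) // 2
-- 		(dx, dy), h1 = solve(s[:mid])
-- 		d2, h2 = solve(s[mid:])
-- 		return (dx + d2[0], dy + d2[1]), h1 + [(dx + x, dy + y) for (x, y) in h2]
-- 	return set([(0, 0)] + solve(steps)[1])
-- ===== Notes on version B (the rewrite author's own statement) =====
-- stated objective: alternative
-- what changed: B computes the visited path by divide-and-conquer: it recursively solves the two halves of the string, translates the right half's relative path by the left half's total displacement, concatenates, and deduplicates once at the end, instead of A's single left-to-right scan mutating x,y and inserting into a set at each step.
import Mathlib
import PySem

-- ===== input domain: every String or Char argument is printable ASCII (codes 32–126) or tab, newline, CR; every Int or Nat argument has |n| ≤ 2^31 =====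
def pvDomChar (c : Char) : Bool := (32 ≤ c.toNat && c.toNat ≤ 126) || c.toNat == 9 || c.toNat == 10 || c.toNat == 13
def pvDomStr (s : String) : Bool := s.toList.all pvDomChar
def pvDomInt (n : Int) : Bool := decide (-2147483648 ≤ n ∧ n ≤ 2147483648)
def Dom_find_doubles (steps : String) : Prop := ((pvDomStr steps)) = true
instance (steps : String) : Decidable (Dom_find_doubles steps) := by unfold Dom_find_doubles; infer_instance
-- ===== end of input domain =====

-- B replaces A's single left-to-right scan by a divide-and-conquer: solve each half, translate the right half's path by the left half's displacement, deduplicate once (alternative decomposition, same result).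

-- ===== PORT A =====
def find_doubles (steps : String) : List (Int × Int) :=
  let st := steps.toList.foldl
    (fun (st : (Int × Int) × PySem.Set (Int × Int)) step =>
      let x := st.1.1
      let y := st.1.2
      let (x, y) :=
        if step = '^' then (x, y + 1)
        else if step = 'v' then (x, y - 1)
        else if step = '<' then (x - 1, y)
        else if step = '>' then (x + 1, y)
        else (x, y)
      ((x, y), PySem.Set.add st.2 (x, y)))
    ((0, 0), PySem.Set.ofList [((0 : Int), (0 : Int))])
  st.2

-- ===== PORT B =====
-- delta of one step character: ((c == ">") - (c == "<"), (c == "^") - (c == "v"))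
def pvDelta (c : Char) : Int × Int :=
  ((if c = '>' then (1 : Int) else 0) - (if c = '<' then 1 else 0),
   (if c = '^' then (1 : Int) else 0) - (if c = 'v' then 1 else 0))

-- solve(s): (total displacement of s, list of positions after each step, relative to the start)
def pvSolve : List Char → (Int × Int) × List (Int × Int)
  | [] => ((0, 0), [])
  | [c] => (pvDelta c, [pvDelta c])
  | c1 :: c2 :: rest =>
    let s := c1 :: c2 :: rest
    let mid := s.length / 2
    let l := pvSolve (s.take mid)
    let r := pvSolve (s.drop mid)
    ((l.1.1 + r.1.1, l.1.2 + r.1.2),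
     l.2 ++ r.2.map (fun p => (l.1.1 + p.1, l.1.2 + p.2)))
  termination_by s => s.length
  decreasing_by
  · simp [List.length_take]; omega
  · simp; omega

def find_doubles_alt (steps : String) : List (Int × Int) :=
  PySem.Set.ofList (((0 : Int), (0 : Int)) :: (pvSolve steps.toList).2)

-- ===== PRECONDITION & SPEC =====
def Spec_find_doubles (steps : String) (out : List (Int × Int)) : Prop := out = find_doubles_alt steps
instance (steps : String) (out : List (Int × Int)) : Decidable (Spec_find_doubles steps out) := by unfold Spec_find_doubles; infer_instance

-- ===== CLAIM (what is proved, stated in full; the proofs are below) =====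
def Claim_equal_find_doubles : Prop := ∀ (steps : String), Dom_find_doubles steps → Spec_find_doubles steps (find_doubles steps)

-- ===== LEMMAS AND PROOFS =====

-- absolute positions visited after each step, starting from pos
def pvPath (cs : List Char) (pos : Int × Int) : List (Int × Int) :=
  match cs with
  | [] => []
  | c :: cs =>
    let p := (pos.1 + (pvDelta c).1, pos.2 + (pvDelta c).2)
    p :: pvPath cs p

-- total displacement of a step list
def pvDisp (cs : List Char) : Int × Int :=
  ((cs.map (fun c => (pvDelta c).1)).sum, (cs.map (fun c => (pvDelta c).2)).sum)

theorem pvStep_eq (c : Char) (x y : Int) :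
    (if c = '^' then (x, y + 1)
     else if c = 'v' then (x, y - 1)
     else if c = '<' then (x - 1, y)
     else if c = '>' then (x + 1, y)
     else (x, y)) = ((x + (pvDelta c).1, y + (pvDelta c).2)) := by
  by_cases h1 : c = '^' <;> by_cases h2 : c = 'v' <;> by_cases h3 : c = '<' <;>
    by_cases h4 : c = '>' <;> simp_all [pvDelta] <;> ring_nf

theorem pvFoldA_eq (cs : List Char) (pos : Int × Int) (s : PySem.Set (Int × Int)) :
    (cs.foldl
      (fun (st : (Int × Int) × PySem.Set (Int × Int)) step =>
        let x := st.1.1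
        let y := st.1.2
        let (x, y) :=
          if step = '^' then (x, y + 1)
          else if step = 'v' then (x, y - 1)
          else if step = '<' then (x - 1, y)
          else if step = '>' then (x + 1, y)
          else (x, y)
        ((x, y), PySem.Set.add st.2 (x, y)))
      (pos, s)).2 = (pvPath cs pos).foldl PySem.Set.add s := by
  induction cs generalizing pos s with
  | nil => rfl
  | cons c cs ih =>
    simp only [List.foldl, pvPath]
    rw [pvStep_eq]
    exact ih _ _

theorem pvPath_translate (cs : List Char) (q : Int × Int) :
    pvPath cs q = (pvPath cs (0, 0)).map (fun r => (q.1 + r.1, q.2 + r.2)) := by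
  induction cs generalizing q with
  | nil => rfl
  | cons c cs ih =>
    simp only [pvPath, List.map]
    rw [ih ((q.1 + (pvDelta c).1, q.2 + (pvDelta c).2)),
      ih (((0 : Int) + (pvDelta c).1, (0 : Int) + (pvDelta c).2)), List.map_map]
    congr 1
    · simp
    · apply List.map_congr_left
      intro a _
      simp only [Function.comp_apply, Prod.mk.injEq]
      constructor <;> ring

theorem pvPath_append (l1 l2 : List Char) (pos : Int × Int) :
    pvPath (l1 ++ l2) pos =
      pvPath l1 pos ++ pvPath l2 (pos.1 + (pvDisp l1).1, pos.2 + (pvDisp l1).2) := by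
  induction l1 generalizing pos with
  | nil => simp [pvPath, pvDisp]
  | cons c l1 ih =>
    simp only [List.cons_append, pvPath]
    rw [ih]
    have hpos : ((pos.1 + (pvDelta c).1, pos.2 + (pvDelta c).2).1 + (pvDisp l1).1,
        (pos.1 + (pvDelta c).1, pos.2 + (pvDelta c).2).2 + (pvDisp l1).2) =
        (pos.1 + (pvDisp (c :: l1)).1, pos.2 + (pvDisp (c :: l1)).2) := by
      simp only [pvDisp, List.map, List.sum_cons, Prod.mk.injEq]
      constructor <;> ring
    rw [hpos]

theorem pvDisp_append (l1 l2 : List Char) :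
    pvDisp (l1 ++ l2) = ((pvDisp l1).1 + (pvDisp l2).1, (pvDisp l1).2 + (pvDisp l2).2) := by
  simp [pvDisp]

theorem pvPath_split (l1 l2 : List Char) :
    pvPath (l1 ++ l2) (0, 0) =
      pvPath l1 (0, 0) ++
        (pvPath l2 (0, 0)).map (fun p => ((pvDisp l1).1 + p.1, (pvDisp l1).2 + p.2)) := by
  rw [pvPath_append, pvPath_translate l2]
  simp

theorem pvSolve_eq (cs : List Char) :
    pvSolve cs = (pvDisp cs, pvPath cs (0, 0)) := by
  induction cs using pvSolve.induct with
  | case1 => rw [pvSolve]; simp [pvDisp, pvPath]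
  | case2 c => rw [pvSolve]; simp [pvDisp, pvPath]
  | case3 c1 c2 rest s mid ih1 ih2 =>
    rw [pvSolve, ih1, ih2]
    have hsplit : List.take mid s ++ List.drop mid s = c1 :: c2 :: rest :=
      List.take_append_drop mid s
    conv_rhs => rw [← hsplit, pvDisp_append, pvPath_split]

-- ===== VERDICT (by name: the statement is the Claim_ definition above) =====
theorem find_doubles_spec : Claim_equal_find_doubles := by
  intro steps _
  unfold Spec_find_doubles find_doubles find_doubles_alt
  rw [pvSolve_eq]
  simp only [pvFoldA_eq]
  rfl
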